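-- pv_equiv track=rewrite | github.com/pbldmngz/codewars | kyu4/human_readable_duration_format.py | format_duration
-- ===== SOURCE A (Python) =====
-- def format_duration(seconds):
--     if seconds == 0: return "now"
--     s = seconds%60
--     m = seconds//60
--     h = m//60
--     m = m%60
--     d = h//24
--     h = h%24
--     y = d//365
--     d = d%365
--     fo, no, t, to = [], "", [y,d,h,m,s], ["year", "day", "hour", "minute", "second"]
--     for c, g in enumerate(t):
--         if g==0: pass
--         elif g>1: fo.append(str(g) + " " + to[c] + "s")
--         else: fo.append(str(g) + " " + to[c])
--     for c, g in enumerate(fo):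
--         if c == len(fo)-1: no += g
--         elif c == len(fo)-2: no += g + " and "
--         else: no += g + ", "
--     return no
-- ===== SOURCE B (Python) =====
-- _UNITS = [(31536000, "year"), (86400, "day"), (3600, "hour"), (60, "minute"), (1, "second")]
--
-- def _parts_left(rem, units):
--     # number of phrase components still to come for this remainder
--     if not units:
--         return 0
--     size, _ = units[0]
--     return (1 if rem // size != 0 else 0) + _parts_left(rem % size, units[1:])
--
-- def _phrase(rem, units):
--     # render the remainder against absolute unit sizes, one recursive pass
--     size, name = units[0]
--     n, rest = rem // size, rem % size
--     if n == 0: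
--         return _phrase(rest, units[1:])
--     part = f"{n} {name}" + ("s" if n > 1 else "")
--     if rest == 0:
--         return part
--     sep = " and " if _parts_left(rest, units[1:]) == 1 else ", "
--     return part + sep + _phrase(rest, units[1:])
--
-- def format_duration(seconds):
--     if seconds == 0:
--         return "now"
--     return _phrase(seconds, _UNITS)
-- ===== Notes on version B (the rewrite author's own statement) =====
-- stated objective: alternative
-- what changed: Instead of A's carry chain of // and % between adjacent units followed by two enumerate loops (format list, then join), B divides the remainder by absolute unit sizes (31536000, 86400, 3600, 60, 1) and builds the sentence in one recursive pass, choosing ' and ' vs ', ' by a lookahead count of remaining nonzero units.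
import Mathlib
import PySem

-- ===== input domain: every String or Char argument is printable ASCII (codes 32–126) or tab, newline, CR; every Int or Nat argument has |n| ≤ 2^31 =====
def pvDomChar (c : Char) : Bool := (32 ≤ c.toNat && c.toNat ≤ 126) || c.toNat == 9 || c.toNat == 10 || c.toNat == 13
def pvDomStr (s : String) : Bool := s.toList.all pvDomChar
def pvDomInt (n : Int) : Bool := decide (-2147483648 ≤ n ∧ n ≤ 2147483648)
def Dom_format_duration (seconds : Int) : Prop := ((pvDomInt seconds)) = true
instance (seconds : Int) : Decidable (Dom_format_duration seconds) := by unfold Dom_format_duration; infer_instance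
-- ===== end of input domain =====

-- B replaces A's unit-to-unit carry chain and its two enumerate loops by division of the
-- remainder by absolute unit sizes and a single recursive sentence-building pass
-- (alternative decomposition; same behaviour, same cost).

-- ===== PORT A =====
-- Strings are carried as List Char (PySem.Chars level) and wrapped with String.ofList at
-- the end. The two loop bodies are the named helpers below; 'to[c]' is ported with
-- pyGet? (the index is always in range, so .getD [] is exact).
def pvStepFo (names : List (List Char)) (fo : List (List Char)) (cg : Int × Int) : List (List Char) :=
  if cg.2 = 0 then fo
  else if cg.2 > 1 then
    fo ++ [PySem.Int.toChars cg.2 ++ " ".toList ++ (PySem.List.pyGet? names cg.1).getD [] ++ "s".toList]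
  else
    fo ++ [PySem.Int.toChars cg.2 ++ " ".toList ++ (PySem.List.pyGet? names cg.1).getD []]

def pvStepJoin (n : Int) (no : List Char) (cg : Int × List Char) : List Char :=
  if cg.1 = n - 1 then no ++ cg.2
  else if cg.1 = n - 2 then no ++ cg.2 ++ " and ".toList
  else no ++ cg.2 ++ ", ".toList

def format_duration (seconds : Int) : String :=
  if seconds = 0 then "now" else
  let s := PySem.Int.mod seconds 60
  let m := PySem.Int.floordiv seconds 60
  let h := PySem.Int.floordiv m 60
  let m := PySem.Int.mod m 60
  let d := PySem.Int.floordiv h 24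
  let h := PySem.Int.mod h 24
  let y := PySem.Int.floordiv d 365
  let d := PySem.Int.mod d 365
  let t : List Int := [y, d, h, m, s]
  let names : List (List Char) :=
    ["year".toList, "day".toList, "hour".toList, "minute".toList, "second".toList]
  let fo : List (List Char) := (PySem.List.enumerate t).foldl (pvStepFo names) []
  let no : List Char := (PySem.List.enumerate fo).foldl (pvStepJoin (fo.length : Int)) []
  String.ofList no

-- ===== PORT B =====
-- Python's recursive helpers _parts_left and _phrase; '//' and '%' are floordiv/mod.
-- pvPhrase on an empty unit list is unreachable from format_duration_alt (Python would
-- raise IndexError there); [] is a placeholder value only.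
def pvPartsLeft : Int → List (Int × List Char) → Int
  | _, [] => 0
  | rem, (sz, _) :: rest =>
      (if PySem.Int.floordiv rem sz ≠ 0 then 1 else 0) + pvPartsLeft (PySem.Int.mod rem sz) rest

def pvPhrase : Int → List (Int × List Char) → List Char
  | _, [] => []
  | rem, (sz, name) :: rest =>
      let n := PySem.Int.floordiv rem sz
      let rest' := PySem.Int.mod rem sz
      if n = 0 then pvPhrase rest' rest
      else
        let part := PySem.Int.toChars n ++ " ".toList ++ name ++ (if n > 1 then "s".toList else [])
        if rest' = 0 then part
        else
          part ++ (if pvPartsLeft rest' rest = 1 then " and ".toList else ", ".toList) ++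
            pvPhrase rest' rest

def pvUnits : List (Int × List Char) :=
  [(31536000, "year".toList), (86400, "day".toList), (3600, "hour".toList),
   (60, "minute".toList), (1, "second".toList)]

def format_duration_alt (seconds : Int) : String :=
  if seconds = 0 then "now" else String.ofList (pvPhrase seconds pvUnits)

-- ===== PRECONDITION & SPEC =====
def Spec_format_duration (seconds : Int) (out : String) : Prop := out = format_duration_alt seconds
instance (seconds : Int) (out : String) : Decidable (Spec_format_duration seconds out) := by unfold Spec_format_duration; infer_instance

-- ===== CLAIM (what is proved, stated in full; the proofs are below) =====
def Claim_equal_format_duration : Prop := ∀ (seconds : Int), Dom_format_duration seconds → Spec_format_duration seconds (format_duration seconds)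

-- ===== LEMMAS AND PROOFS =====

-- proof-only helpers: one formatted phrase component, the amounts list, sentence assembly
def pvFmt (p : Int × List Char) : List Char :=
  PySem.Int.toChars p.1 ++ " ".toList ++ p.2 ++ (if p.1 > 1 then "s".toList else [])

def pvAmts : Int → List (Int × List Char) → List (Int × List Char)
  | _, [] => []
  | rem, (sz, nm) :: rest => (PySem.Int.floordiv rem sz, nm) :: pvAmts (PySem.Int.mod rem sz) rest

def pvSent : List (List Char) → List Char
  | [] => []
  | [a] => a
  | a :: b :: t => a ++ (if t = [] then " and ".toList else ", ".toList) ++ pvSent (b :: t)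

-- a unit list whose sizes are positive and which ends at size 1
def pvGoodUnits : List (Int × List Char) → Bool
  | [] => false
  | (sz, _) :: [] => sz == 1
  | (sz, _) :: u :: rest => decide (0 < sz) && pvGoodUnits (u :: rest)

-- an if over the plural 's' pulled inside the appended element
theorem pv_step_fmt (fo : List (List Char)) (g : Int) (nm : List Char) :
    (if g > 1 then fo ++ [PySem.Int.toChars g ++ " ".toList ++ nm ++ "s".toList]
     else fo ++ [PySem.Int.toChars g ++ " ".toList ++ nm]) = fo ++ [pvFmt (g, nm)] := by
  unfold pvFmt; split_ifs <;> simp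

-- A's first loop over enumerate([y,d,h,m,s]) builds exactly the filter-then-format list.
set_option maxHeartbeats 1000000 in
theorem pv_fo_eq (y d h m s : Int) :
    (PySem.List.enumerate [y, d, h, m, s]).foldl
      (pvStepFo ["year".toList, "day".toList, "hour".toList, "minute".toList, "second".toList]) []
    = ([(y, "year".toList), (d, "day".toList), (h, "hour".toList), (m, "minute".toList),
        (s, "second".toList)].filter (fun p => p.1 ≠ 0)).map pvFmt := by
  have g0 : PySem.List.pyGet? ["year".toList, "day".toList, "hour".toList, "minute".toList,
      "second".toList] (0 : Int) = some "year".toList := by rfl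
  have g1 : PySem.List.pyGet? ["year".toList, "day".toList, "hour".toList, "minute".toList,
      "second".toList] (1 : Int) = some "day".toList := by rfl
  have g2 : PySem.List.pyGet? ["year".toList, "day".toList, "hour".toList, "minute".toList,
      "second".toList] (2 : Int) = some "hour".toList := by rfl
  have g3 : PySem.List.pyGet? ["year".toList, "day".toList, "hour".toList, "minute".toList,
      "second".toList] (3 : Int) = some "minute".toList := by rfl
  have g4 : PySem.List.pyGet? ["year".toList, "day".toList, "hour".toList, "minute".toList,
      "second".toList] (4 : Int) = some "second".toList := by rfl
  by_cases hy : y = 0 <;> by_cases hd : d = 0 <;> by_cases hh : h = 0 <;>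
    by_cases hm : m = 0 <;> by_cases hs : s = 0 <;>
  simp only [PySem.List.enumerate_cons, PySem.List.enumerate_nil, List.foldl_cons, List.foldl_nil,
    pvStepFo, Int.reduceAdd, g0, g1, g2, g3, g4, Option.getD_some, pv_step_fmt, hy, hd, hh, hm, hs,
    List.filter_cons, List.filter_nil, List.map_cons, List.map_nil, if_true, if_false,
    ne_eq, decide_not, decide_true, Bool.not_true, Bool.not_false,
    Bool.false_eq_true, decide_false] <;> (try simp)

-- A's join loop, started anywhere, appends exactly the assembled sentence.
theorem pv_join_eq_sent (n : Int) : ∀ (l : List (List Char)) (k : Int) (acc : List Char),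
    k + l.length = n →
    (PySem.List.enumerate l k).foldl (pvStepJoin n) acc = acc ++ pvSent l := by
  intro l
  induction l with
  | nil => intro k acc _; simp [pvSent]
  | cons a t ih =>
    intro k acc hn
    rw [PySem.List.enumerate_cons, List.foldl_cons]
    cases t with
    | nil =>
      simp only [List.length_cons, List.length_nil] at hn
      simp [pvStepJoin, pvSent, if_pos (by omega : k = n - 1)]
    | cons b t' =>
      rw [ih (k + 1) _ (by simp at hn ⊢; omega)]
      cases t' with
      | nil =>
        simp only [List.length_cons, List.length_nil] at hn
        simp only [pvStepJoin, if_neg (by omega : ¬ k = n - 1), if_pos (by omega : k = n - 2)]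
        simp [pvSent, List.append_assoc]
      | cons c t'' =>
        simp only [List.length_cons] at hn
        simp only [pvStepJoin, if_neg (by omega : ¬ k = n - 1), if_neg (by omega : ¬ k = n - 2)]
        simp [pvSent, List.append_assoc]

-- the lookahead count is the number of parts still to be rendered
theorem pv_count_eq : ∀ (us : List (Int × List Char)) (r : Int),
    pvPartsLeft r us = (((pvAmts r us).filter (fun p => p.1 ≠ 0)).length : Int) := by
  intro us
  induction us with
  | nil => intro r; simp [pvPartsLeft, pvAmts]
  | cons u rest ih =>
    intro r
    obtain ⟨sz, nm⟩ := u
    simp only [pvPartsLeft, pvAmts, List.filter_cons]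
    by_cases h : PySem.Int.floordiv r sz = 0 <;> (simp [h, ih]; try omega)

-- all amounts of the zero remainder are zero
theorem pv_amts_of_zero : ∀ (us : List (Int × List Char)) (p : Int × List Char),
    p ∈ pvAmts 0 us → p.1 = 0 := by
  intro us
  induction us with
  | nil => intro p hp; simp [pvAmts] at hp
  | cons u rest ih =>
    intro p hp
    obtain ⟨sz, nm⟩ := u
    have h0 : PySem.Int.floordiv 0 sz = 0 := by simp [PySem.Int.floordiv]
    have h0' : PySem.Int.mod 0 sz = 0 := by simp [PySem.Int.mod]
    simp only [pvAmts, h0, h0', List.mem_cons] at hp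
    rcases hp with h | h
    · rw [h]
    · exact ih p h

-- on a good unit list, a remainder all of whose amounts are zero is itself zero
theorem pv_amts_zero : ∀ (us : List (Int × List Char)), pvGoodUnits us = true →
    ∀ (r : Int), (∀ p ∈ pvAmts r us, p.1 = 0) → r = 0 := by
  intro us
  induction us with
  | nil => intro hg; simp [pvGoodUnits] at hg
  | cons u rest ih =>
    intro hg r hall
    obtain ⟨sz, nm⟩ := u
    cases rest with
    | nil =>
      have hsz : sz = 1 := by simpa [pvGoodUnits] using hg
      have h1 : PySem.Int.floordiv r sz = 0 := by
        have := hall (PySem.Int.floordiv r sz, nm) (by simp [pvAmts])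
        simpa using this
      have he := PySem.Int.floordiv_mul_add_mod r sz
      have hm0 : PySem.Int.mod r 1 = 0 := by
        have h1 := PySem.Int.mod_nonneg r (by omega : (0:Int) < 1)
        have h2 := PySem.Int.mod_lt r (by omega : (0:Int) < 1)
        omega
      rw [hsz] at he h1
      rw [hm0] at he
      omega
    | cons v rest' =>
      have hg' : pvGoodUnits (v :: rest') = true := by
        simp only [pvGoodUnits, Bool.and_eq_true] at hg; exact hg.2
      have hfd : PySem.Int.floordiv r sz = 0 := by
        have := hall _ (by simp [pvAmts] : ((PySem.Int.floordiv r sz, nm) : Int × List Char) ∈ _)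
        simpa using this
      have hmod : PySem.Int.mod r sz = 0 := by
        apply ih hg'
        intro p hp
        refine hall p ?_
        simp only [pvAmts]
        exact List.mem_cons_of_mem _ hp
      have he := PySem.Int.floordiv_mul_add_mod r sz
      rw [hfd, hmod] at he
      omega

-- B's single recursive pass renders the sentence of the nonzero amounts.
theorem pv_phrase_eq : ∀ (us : List (Int × List Char)), pvGoodUnits us = true →
    ∀ (r : Int),
    pvPhrase r us = pvSent (((pvAmts r us).filter (fun p => p.1 ≠ 0)).map pvFmt) := by
  intro us
  induction us with
  | nil => intro hg; simp [pvGoodUnits] at hg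
  | cons u rest ih =>
    intro hg r
    obtain ⟨sz, nm⟩ := u
    simp only [pvPhrase, pvAmts, List.filter_cons]
    by_cases hn : PySem.Int.floordiv r sz = 0
    · simp only [hn, ne_eq, not_true_eq_false, decide_false, Bool.false_eq_true,
        if_false]
      cases rest with
      | nil => simp [pvPhrase, pvAmts, pvSent]
      | cons v rest' =>
        have hg' : pvGoodUnits (v :: rest') = true := by
          simp only [pvGoodUnits, Bool.and_eq_true] at hg; exact hg.2
        exact ih hg' _
    · rw [if_neg hn]
      simp only [ne_eq, hn, not_false_eq_true, decide_true, if_true, List.map_cons]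
      by_cases hr : PySem.Int.mod r sz = 0
      · rw [if_pos hr]
        have hnil : (pvAmts (PySem.Int.mod r sz) rest).filter (fun p => p.1 ≠ 0) = [] := by
          rw [List.filter_eq_nil_iff]
          intro p hp
          rw [hr] at hp
          simp [pv_amts_of_zero rest p hp]
        rw [hnil]
        simp [pvSent, pvFmt]
      · rw [if_neg hr]
        cases rest with
        | nil =>
          have hsz : sz = 1 := by simpa [pvGoodUnits] using hg
          exfalso
          apply hr
          have h1 := PySem.Int.mod_nonneg r (by rw [hsz]; omega : (0:Int) < sz)
          have h2 := PySem.Int.mod_lt r (by rw [hsz]; omega : (0:Int) < sz)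
          omega
        | cons v rest' =>
          have hg' : pvGoodUnits (v :: rest') = true := by
            simp only [pvGoodUnits, Bool.and_eq_true] at hg; exact hg.2
          have hPne : ((pvAmts (PySem.Int.mod r sz) (v :: rest')).filter
              (fun p => p.1 ≠ 0)) ≠ [] := by
            intro hnil
            apply hr
            apply pv_amts_zero _ hg'
            intro p hp
            have := List.filter_eq_nil_iff.mp hnil p hp
            simpa using this
          rw [ih hg']
          obtain ⟨p, t, hpt⟩ := List.exists_cons_of_ne_nil hPne
          have hcnt := pv_count_eq (v :: rest') (PySem.Int.mod r sz)
          rw [hpt] at hcnt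
          rw [hpt]
          by_cases ht : t = []
          · subst ht
            have h1 : pvPartsLeft (PySem.Int.mod r sz) (v :: rest') = 1 := by
              rw [hcnt]; simp
            simp [pvSent, pvFmt, h1, List.append_assoc]
          · have h1 : pvPartsLeft (PySem.Int.mod r sz) (v :: rest') ≠ 1 := by
              rw [hcnt]
              have : t.length ≠ 0 := fun h => ht (List.length_eq_zero_iff.mp h)
              simp only [List.length_cons]
              omega
            simp [pvSent, pvFmt, h1, List.map_eq_nil_iff, ht, List.append_assoc]

-- ===== VERDICT (by name: the statement is the Claim_ definition above) =====
theorem format_duration_spec : Claim_equal_format_duration := by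
  intro seconds _
  unfold Spec_format_duration
  by_cases h0 : seconds = 0
  · simp [format_duration, format_duration_alt, h0]
  · simp only [format_duration, format_duration_alt, if_neg h0]
    -- A-side chained values
    have e4 := PySem.Int.floordiv_mul_add_mod seconds 60
    have b4a := PySem.Int.mod_nonneg seconds (by omega : (0:Int) < 60)
    have b4b := PySem.Int.mod_lt seconds (by omega : (0:Int) < 60)
    have e3 := PySem.Int.floordiv_mul_add_mod (PySem.Int.floordiv seconds 60) 60
    have b3a := PySem.Int.mod_nonneg (PySem.Int.floordiv seconds 60) (by omega : (0:Int) < 60)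
    have b3b := PySem.Int.mod_lt (PySem.Int.floordiv seconds 60) (by omega : (0:Int) < 60)
    have e2 := PySem.Int.floordiv_mul_add_mod (PySem.Int.floordiv (PySem.Int.floordiv seconds 60) 60) 24
    have b2a := PySem.Int.mod_nonneg (PySem.Int.floordiv (PySem.Int.floordiv seconds 60) 60) (by omega : (0:Int) < 24)
    have b2b := PySem.Int.mod_lt (PySem.Int.floordiv (PySem.Int.floordiv seconds 60) 60) (by omega : (0:Int) < 24)
    have e1 := PySem.Int.floordiv_mul_add_mod (PySem.Int.floordiv (PySem.Int.floordiv (PySem.Int.floordiv seconds 60) 60) 24) 365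
    have b1a := PySem.Int.mod_nonneg (PySem.Int.floordiv (PySem.Int.floordiv (PySem.Int.floordiv seconds 60) 60) 24) (by omega : (0:Int) < 365)
    have b1b := PySem.Int.mod_lt (PySem.Int.floordiv (PySem.Int.floordiv (PySem.Int.floordiv seconds 60) 60) 24) (by omega : (0:Int) < 365)
    generalize hs : PySem.Int.mod seconds 60 = s at *
    generalize hm : PySem.Int.mod (PySem.Int.floordiv seconds 60) 60 = m at *
    generalize hh : PySem.Int.mod (PySem.Int.floordiv (PySem.Int.floordiv seconds 60) 60) 24 = h at *
    generalize hd : PySem.Int.mod (PySem.Int.floordiv (PySem.Int.floordiv (PySem.Int.floordiv seconds 60) 60) 24) 365 = d at *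
    generalize hy : PySem.Int.floordiv (PySem.Int.floordiv (PySem.Int.floordiv (PySem.Int.floordiv seconds 60) 60) 24) 365 = y at *
    -- B-side closed-form values coincide with them
    have f1e := PySem.Int.floordiv_mul_add_mod seconds 31536000
    have f1a := PySem.Int.mod_nonneg seconds (by omega : (0:Int) < 31536000)
    have f1b := PySem.Int.mod_lt seconds (by omega : (0:Int) < 31536000)
    have hY : PySem.Int.floordiv seconds 31536000 = y := by omega
    have hR1 : PySem.Int.mod seconds 31536000 = d * 86400 + h * 3600 + m * 60 + s := by omega
    have f2e := PySem.Int.floordiv_mul_add_mod (PySem.Int.mod seconds 31536000) 86400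
    have f2a := PySem.Int.mod_nonneg (PySem.Int.mod seconds 31536000) (by omega : (0:Int) < 86400)
    have f2b := PySem.Int.mod_lt (PySem.Int.mod seconds 31536000) (by omega : (0:Int) < 86400)
    have hD : PySem.Int.floordiv (PySem.Int.mod seconds 31536000) 86400 = d := by omega
    have hR2 : PySem.Int.mod (PySem.Int.mod seconds 31536000) 86400 = h * 3600 + m * 60 + s := by omega
    have f3e := PySem.Int.floordiv_mul_add_mod (PySem.Int.mod (PySem.Int.mod seconds 31536000) 86400) 3600
    have f3a := PySem.Int.mod_nonneg (PySem.Int.mod (PySem.Int.mod seconds 31536000) 86400) (by omega : (0:Int) < 3600)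
    have f3b := PySem.Int.mod_lt (PySem.Int.mod (PySem.Int.mod seconds 31536000) 86400) (by omega : (0:Int) < 3600)
    have hH : PySem.Int.floordiv (PySem.Int.mod (PySem.Int.mod seconds 31536000) 86400) 3600 = h := by omega
    have hR3 : PySem.Int.mod (PySem.Int.mod (PySem.Int.mod seconds 31536000) 86400) 3600 = m * 60 + s := by omega
    have f4e := PySem.Int.floordiv_mul_add_mod (PySem.Int.mod (PySem.Int.mod (PySem.Int.mod seconds 31536000) 86400) 3600) 60
    have f4a := PySem.Int.mod_nonneg (PySem.Int.mod (PySem.Int.mod (PySem.Int.mod seconds 31536000) 86400) 3600) (by omega : (0:Int) < 60)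
    have f4b := PySem.Int.mod_lt (PySem.Int.mod (PySem.Int.mod (PySem.Int.mod seconds 31536000) 86400) 3600) (by omega : (0:Int) < 60)
    have hM : PySem.Int.floordiv (PySem.Int.mod (PySem.Int.mod (PySem.Int.mod seconds 31536000) 86400) 3600) 60 = m := by omega
    have hR4 : PySem.Int.mod (PySem.Int.mod (PySem.Int.mod (PySem.Int.mod seconds 31536000) 86400) 3600) 60 = s := by omega
    have f5e := PySem.Int.floordiv_mul_add_mod (PySem.Int.mod (PySem.Int.mod (PySem.Int.mod (PySem.Int.mod seconds 31536000) 86400) 3600) 60) 1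
    have f5a := PySem.Int.mod_nonneg (PySem.Int.mod (PySem.Int.mod (PySem.Int.mod (PySem.Int.mod seconds 31536000) 86400) 3600) 60) (by omega : (0:Int) < 1)
    have f5b := PySem.Int.mod_lt (PySem.Int.mod (PySem.Int.mod (PySem.Int.mod (PySem.Int.mod seconds 31536000) 86400) 3600) 60) (by omega : (0:Int) < 1)
    have hS : PySem.Int.floordiv (PySem.Int.mod (PySem.Int.mod (PySem.Int.mod (PySem.Int.mod seconds 31536000) 86400) 3600) 60) 1 = s := by omega
    -- rewrite both sides to the common normal form
    rw [pv_fo_eq]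
    rw [pv_join_eq_sent _ _ 0 [] (by simp)]
    rw [pv_phrase_eq pvUnits (by decide) seconds]
    have hAmts : pvAmts seconds pvUnits
        = [(y, "year".toList), (d, "day".toList), (h, "hour".toList), (m, "minute".toList),
           (s, "second".toList)] := by
      simp only [pvUnits, pvAmts, hY, hD, hH, hM, hS]
    rw [hAmts]
    simp
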